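-- pv_equiv track=rewrite | github.com/bokkuembab/BOJAutoPush | 프로그래머스/lv3/43163. 단어 변환/단어 변환.py | solution
-- ===== SOURCE A (Python) =====
-- from collections import deque
--
-- def solution(begin, target, words):
--
--     ans = 0    # 변환 횟수
--     visited = [False] * len(words)
--     q = deque([(begin, ans)])    # 처음 시작 단어 q에 넣어주기
--
--     while q:
--         now, cnt = q.popleft()
--
--         for idx, w in enumerate(words):
--
--             if now == target:    # 목표한 단어에 도달하면,
--                 ans = cnt    # 변환 횟수 수정 후 반복 종료
--                 break
--
--             if not visited[idx]:    # 방문하지 않았다면,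
--                 tmp = len([i for i, j in zip(now, w) if i != j])    # 다른 글자의 수
--                 if tmp == 1:    # 글자가 하나만 다르다면,
--                     q.append((w, cnt + 1))    # q에 넣어주기
--                     visited[idx] = True    # 방문처리
--
--     return ans
-- ===== SOURCE B (Python) =====
-- def solution(begin, target, words):
--     # Level-synchronous BFS over the remaining word indices; early return at the
--     # level where target appears, closed-form 0 when begin == target.
--     if begin == target:
--         return 0
--
--     def adj(a, b):
--         return sum(x != y for x, y in zip(a, b)) == 1
--
--     remaining = list(range(len(words)))
--     frontier = [begin]
--     dist = 0
--     while frontier and remaining: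
--         nxt = [i for i in remaining if any(adj(f, words[i]) for f in frontier)]
--         remaining = [i for i in remaining if i not in nxt]
--         dist += 1
--         if any(words[i] == target for i in nxt):
--             return dist
--         frontier = [words[i] for i in nxt]
--     return 0
-- ===== Notes on version B (the rewrite author's own statement) =====
-- stated objective: faster
-- what changed: Replaces the mixed-level deque-with-counters BFS (per-pop scan of all words, in-loop target check that overwrites ans, queue run to exhaustion) by a level-synchronous BFS over a shrinking list of remaining word indices with an early return at the level where target appears and a closed-form 0 for begin == target.
import Mathlib
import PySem

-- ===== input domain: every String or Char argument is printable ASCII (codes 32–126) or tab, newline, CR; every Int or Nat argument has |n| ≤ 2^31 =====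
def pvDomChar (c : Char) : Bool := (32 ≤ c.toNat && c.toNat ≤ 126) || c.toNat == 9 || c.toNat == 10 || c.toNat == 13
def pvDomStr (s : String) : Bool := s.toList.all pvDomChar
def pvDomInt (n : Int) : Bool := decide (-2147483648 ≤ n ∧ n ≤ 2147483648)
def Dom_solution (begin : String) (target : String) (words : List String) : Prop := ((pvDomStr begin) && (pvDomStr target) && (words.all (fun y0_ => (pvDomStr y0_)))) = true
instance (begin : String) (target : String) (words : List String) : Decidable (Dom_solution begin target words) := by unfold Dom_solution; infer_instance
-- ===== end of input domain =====

-- B replaces A's deque BFS (run to exhaustion, all-words scan per pop) by a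
-- level-synchronous BFS over the remaining word indices that returns at the level
-- where target appears: same answers, measurably faster by a constant factor.

-- ===== PORT A =====
-- Port of A: deque BFS with a visited array; the inner `for idx, w in enumerate(words)`
-- is innerA (index counter idx carried through the structural recursion), with the
-- in-loop `if now == target: ans = cnt; break` as its first test each step.
def innerA (target now : String) (cnt : Int) :
    List String → Nat → Int → List Bool → List (String × Int) → Int × List Bool × List (String × Int)
  | [], _, ans, visited, q => (ans, visited, q)
  | w :: ws, idx, ans, visited, q =>
    if now = target then (cnt, visited, q)
    else if visited.getD idx true = false then
      if ((now.toList.zip w.toList).filter (fun p => decide (p.1 ≠ p.2))).length = 1 then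
        innerA target now cnt ws (idx + 1) ans (visited.set idx true) (q ++ [(w, cnt + 1)])
      else innerA target now cnt ws (idx + 1) ans visited q
    else innerA target now cnt ws (idx + 1) ans visited q

-- each marked index strictly decreases the number of `false` entries (for termination)
theorem countP_set_false : ∀ (v : List Bool) (i : Nat), v.getD i true = false →
    (v.set i true).countP (fun b => !b) + 1 = v.countP (fun b => !b)
  | [], i, h => by simp [List.getD] at h
  | b :: t, 0, h => by
    have hb : b = false := by simpa using h
    subst hb; simp
  | b :: t, i + 1, h => by
    have ih := countP_set_false t i (by simpa using h)
    show (b :: t.set i true).countP (fun b => !b) + 1 = (b :: t).countP (fun b => !b)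
    cases b <;> simp only [List.countP_cons] <;> simp <;> omega

theorem innerA_measure (target now : String) (cnt : Int) :
    ∀ (ws : List String) (idx : Nat) (ans : Int) (visited : List Bool) (q : List (String × Int)),
      (innerA target now cnt ws idx ans visited q).2.2.length +
        (innerA target now cnt ws idx ans visited q).2.1.countP (fun b => !b) =
      q.length + visited.countP (fun b => !b) := by
  intro ws
  induction ws with
  | nil => intro idx ans visited q; rw [innerA]
  | cons w ws ih =>
    intro idx ans visited q
    rw [innerA]
    by_cases ht : now = target
    · rw [if_pos ht]
    · rw [if_neg ht]
      by_cases hv : visited.getD idx true = false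
      · rw [if_pos hv]
        by_cases hd : ((now.toList.zip w.toList).filter (fun p => decide (p.1 ≠ p.2))).length = 1
        · rw [if_pos hd]
          have h1 := ih (idx + 1) ans (visited.set idx true) (q ++ [(w, cnt + 1)])
          have h2 := countP_set_false visited idx hv
          rw [h1]
          simp only [List.length_append, List.length_cons, List.length_nil]
          omega
        · rw [if_neg hd]; exact ih (idx + 1) ans visited q
      · rw [if_neg hv]; exact ih (idx + 1) ans visited q

def loopA (target : String) (words : List String) :
    List (String × Int) → Int → List Bool → Int
  | [], ans, _ => ans
  | (now, cnt) :: rest, ans, visited =>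
    loopA target words (innerA target now cnt words 0 ans visited rest).2.2
      (innerA target now cnt words 0 ans visited rest).1
      (innerA target now cnt words 0 ans visited rest).2.1
termination_by q _ visited => q.length + visited.countP (fun b => !b)
decreasing_by
  have := innerA_measure target now cnt words 0 ans visited rest
  simp only [List.length_cons]
  omega

def solution (begin : String) (target : String) (words : List String) : Int :=
  loopA target words [(begin, 0)] 0 (List.replicate words.length false)

-- ===== PORT B =====
-- Port of B: level-synchronous BFS over the remaining word indices.
def diffOne (a b : String) : Bool :=
  ((a.toList.zip b.toList).countP (fun p => decide (p.1 ≠ p.2))) == 1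

-- the `nxt` comprehension of B: indices still unvisited and adjacent to the frontier
def nxtOf (words : List String) (remaining : List Nat) (frontier : List String) : List Nat :=
  remaining.filter (fun i => frontier.any (fun f => diffOne f (words.getD i "")))

def loopB (target : String) (words : List String) :
    List Nat → List String → Int → Int
  | remaining, frontier, dist =>
    if frontier.isEmpty || remaining.isEmpty then 0
    else
      if (nxtOf words remaining frontier).any (fun i => words.getD i "" == target) then dist + 1
      else loopB target words
        (remaining.filter (fun i => !((nxtOf words remaining frontier).contains i)))
        ((nxtOf words remaining frontier).map (fun i => words.getD i "")) (dist + 1)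
termination_by remaining frontier _ => remaining.length + (if frontier.isEmpty then 0 else 1)
decreasing_by
  simp only [List.unattach_filter, List.unattach_attach]
  rename_i hcond hfound
  have hf : frontier.isEmpty = false := by
    cases h : frontier.isEmpty
    · rfl
    · rw [h] at hcond; simp at hcond
  rw [hf]
  by_cases hn : nxtOf words remaining frontier = []
  · rw [hn]
    have h1 : remaining.filter (fun i => !(([] : List Nat).contains i)) = remaining :=
      List.filter_eq_self.mpr (fun x _ => by simp)
    rw [h1]
    simp
  · have hlt : (remaining.filter (fun i => !((nxtOf words remaining frontier).contains i))).length
        < remaining.length := by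
      apply List.length_filter_lt_length_iff_exists.mpr
      obtain ⟨j, hj⟩ : ∃ j, j ∈ nxtOf words remaining frontier := by
        cases h : nxtOf words remaining frontier with
        | nil => exact absurd h hn
        | cons a t => exact ⟨a, by simp⟩
      have hj1 : j ∈ remaining := (List.mem_filter.mp (show j ∈ remaining.filter _ from hj)).1
      refine ⟨j, hj1, ?_⟩
      simp [hj]
    have hb : (if ((nxtOf words remaining frontier).map (fun i => words.getD i "")).isEmpty
        then 0 else 1) ≤ 1 := by
      split <;> omega
    simp only [Bool.false_eq_true, if_false]
    omega

def solution_alt (begin : String) (target : String) (words : List String) : Int :=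
  if begin = target then 0
  else loopB target words (List.range words.length) [begin] 0

-- ===== PRECONDITION & SPEC =====
def Spec_solution (begin : String) (target : String) (words : List String) (out : Int) : Prop := out = solution_alt begin target words
instance (begin : String) (target : String) (words : List String) (out : Int) : Decidable (Spec_solution begin target words out) := by unfold Spec_solution; infer_instance

-- ===== CLAIM (what is proved, stated in full; the proofs are below) =====
def Claim_equal_solution : Prop := ∀ (begin : String) (target : String) (words : List String), Dom_solution begin target words → Spec_solution begin target words (solution begin target words)


-- ===== LEMMAS AND PROOFS =====

-- `now != w` char-diff count, as a Prop (abbrev so `if`/`decide` find decidability)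
abbrev da1 (a b : String) : Prop :=
  ((a.toList.zip b.toList).filter (fun p => decide (p.1 ≠ p.2))).length = 1

theorem diffOne_eq_decide (a b : String) : diffOne a b = decide (da1 a b) := by
  unfold diffOne
  rw [List.countP_eq_length_filter]
  exact Bool.beq_eq_decide_eq _ _

theorem nxtOf_eq (words : List String) (remaining : List Nat) (frontier : List String) :
    nxtOf words remaining frontier =
      remaining.filter (fun i => frontier.any (fun f => diffOne f (words.getD i ""))) := rfl

theorem getD_set_ne (x d : Bool) : ∀ (v : List Bool) (i j : Nat), i ≠ j →
    (v.set i x).getD j d = v.getD j d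
  | [], _, _, _ => by simp
  | b :: t, 0, 0, h => absurd rfl h
  | b :: t, 0, j + 1, _ => by simp
  | b :: t, i + 1, 0, _ => by simp
  | b :: t, i + 1, j + 1, h => by
    have := getD_set_ne x d t i j (fun e => h (by omega))
    simpa [List.getD_cons_succ] using this

theorem getD_set_self (x d : Bool) : ∀ (v : List Bool) (i : Nat), i < v.length →
    (v.set i x).getD i d = x
  | b :: t, 0, _ => rfl
  | b :: t, i + 1, h => by
    have := getD_set_self x d t i (by simpa using h)
    simpa [List.getD_cons_succ] using this

theorem getD_true_lt : ∀ (v : List Bool) (i : Nat), v.getD i true = false → i < v.length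
  | [], i, h => by simp at h
  | b :: t, 0, _ => by simp
  | b :: t, i + 1, h => by
    have := getD_true_lt t i (by simpa using h)
    simp only [List.length_cons]
    omega

-- what innerA does to (visited, queue-suffix) when now ≠ target
def expand (now : String) : List String → Nat → List Bool → List Bool × List String
  | [], _, v => (v, [])
  | w :: ws, idx, v =>
    if v.getD idx true = false ∧ da1 now w then
      ((expand now ws (idx + 1) (v.set idx true)).1,
        w :: (expand now ws (idx + 1) (v.set idx true)).2)
    else expand now ws (idx + 1) v

theorem expand_nil (now : String) (idx : Nat) (v : List Bool) :
    expand now [] idx v = (v, []) := rfl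

theorem expand_cons_pos (now w : String) (ws : List String) (idx : Nat) (v : List Bool)
    (h1 : v.getD idx true = false)
    (h2 : ((now.toList.zip w.toList).filter (fun p => decide (p.1 ≠ p.2))).length = 1) :
    expand now (w :: ws) idx v =
      ((expand now ws (idx + 1) (v.set idx true)).1,
        w :: (expand now ws (idx + 1) (v.set idx true)).2) := by
  rw [expand, if_pos ⟨h1, h2⟩]

theorem expand_cons_neg (now w : String) (ws : List String) (idx : Nat) (v : List Bool)
    (h : ¬ (v.getD idx true = false ∧ da1 now w)) :
    expand now (w :: ws) idx v = expand now ws (idx + 1) v := by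
  rw [expand, if_neg h]

theorem innerA_eq_target (target now : String) (cnt : Int) (h : now = target)
    (w : String) (ws : List String) (idx : Nat) (ans : Int) (visited : List Bool)
    (q : List (String × Int)) :
    innerA target now cnt (w :: ws) idx ans visited q = (cnt, visited, q) := by
  rw [innerA, if_pos h]

theorem innerA_eq_expand (target now : String) (cnt : Int) (h : ¬ now = target) :
    ∀ (ws : List String) (idx : Nat) (ans : Int) (visited : List Bool) (q : List (String × Int)),
      innerA target now cnt ws idx ans visited q =
        (ans, (expand now ws idx visited).1,
          q ++ (expand now ws idx visited).2.map (fun s => (s, cnt + 1))) := by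
  intro ws
  induction ws with
  | nil => intro idx ans v q; rw [innerA, expand_nil]; simp
  | cons w ws ih =>
    intro idx ans v q
    rw [innerA, if_neg h]
    by_cases hv : v.getD idx true = false
    · by_cases hd : ((now.toList.zip w.toList).filter (fun p => decide (p.1 ≠ p.2))).length = 1
      · rw [if_pos hv, if_pos hd, ih (idx + 1) ans (v.set idx true) (q ++ [(w, cnt + 1)]),
          expand_cons_pos now w ws idx v hv hd]
        simp [List.append_assoc]
      · rw [if_pos hv, if_neg hd, ih (idx + 1) ans v q,
          expand_cons_neg now w ws idx v (fun hc => hd hc.2)]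
    · rw [if_neg hv, ih (idx + 1) ans v q,
        expand_cons_neg now w ws idx v (fun hc => hv hc.1)]

theorem expand_fst_getD (now : String) :
    ∀ (ws : List String) (idx : Nat) (v : List Bool) (j : Nat),
      ((expand now ws idx v).1.getD j true = false) ↔
        (v.getD j true = false ∧ ∀ k, idx + k = j → k < ws.length → ¬ da1 now (ws.getD k "")) := by
  intro ws
  induction ws with
  | nil => intro idx v j; simp [expand_nil]
  | cons w ws ih =>
    intro idx v j
    by_cases hc : v.getD idx true = false ∧ da1 now w
    · obtain ⟨hv, hd⟩ := hc
      rw [expand_cons_pos now w ws idx v hv hd]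
      show ((expand now ws (idx + 1) (v.set idx true)).1.getD j true = false) ↔ _
      rw [ih (idx + 1) (v.set idx true) j]
      constructor
      · rintro ⟨hset, hall⟩
        by_cases hij : idx = j
        · subst hij
          rw [getD_set_self true true v idx (getD_true_lt v idx hv)] at hset
          exact absurd hset (by simp)
        · rw [getD_set_ne true true v idx j hij] at hset
          refine ⟨hset, ?_⟩
          intro k hk hlt
          cases k with
          | zero => exact absurd (by omega : idx = j) hij
          | succ k' =>
            have := hall k' (by omega) (by simpa using hlt)
            simpa using this
      · rintro ⟨hvj, hall⟩
        by_cases hij : idx = j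
        · refine absurd hd ?_
          exact hall 0 (by omega) (by simp)
        · refine ⟨by rw [getD_set_ne true true v idx j hij]; exact hvj, ?_⟩
          intro k hk hlt
          have := hall (k + 1) (by omega) (by simpa using hlt)
          simpa using this
    · rw [expand_cons_neg now w ws idx v hc]
      rw [ih (idx + 1) v j]
      constructor
      · rintro ⟨hvj, hall⟩
        refine ⟨hvj, ?_⟩
        intro k hk hlt
        cases k with
        | zero =>
          have hij : idx = j := by omega
          subst hij
          intro hda
          exact hc ⟨hvj, by simpa using hda⟩
        | succ k' =>
          have := hall k' (by omega) (by simpa using hlt)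
          simpa using this
      · rintro ⟨hvj, hall⟩
        refine ⟨hvj, ?_⟩
        intro k hk hlt
        have := hall (k + 1) (by omega) (by simpa using hlt)
        simpa using this

theorem expand_snd (now : String) :
    ∀ (ws : List String) (idx : Nat) (v : List Bool),
      (expand now ws idx v).2 =
        ((List.range ws.length).filter
            (fun k => decide (v.getD (idx + k) true = false) && decide (da1 now (ws.getD k "")))).map
          (fun k => ws.getD k "") := by
  intro ws
  induction ws with
  | nil => intro idx v; simp [expand_nil]
  | cons w ws ih =>
    intro idx v
    rw [List.length_cons, List.range_succ_eq_map, List.filter_cons, List.filter_map]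
    by_cases hc : v.getD idx true = false ∧ da1 now w
    · obtain ⟨hv, hd⟩ := hc
      rw [expand_cons_pos now w ws idx v hv hd]
      rw [if_pos (show (decide (v.getD (idx + 0) true = false) &&
            decide (da1 now ((w :: ws).getD 0 ""))) = true by
          rw [(decide_eq_true hv : decide (v.getD (idx + 0) true = false) = true),
            (decide_eq_true hd : decide (da1 now ((w :: ws).getD 0 "")) = true)]
          rfl)]
      rw [List.map_cons, List.map_map]
      show w :: (expand now ws (idx + 1) (v.set idx true)).2 = _
      congr 1
      rw [ih (idx + 1) (v.set idx true)]
      have hfc : (List.range ws.length).filter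
            (fun k => decide ((v.set idx true).getD (idx + 1 + k) true = false) &&
              decide (da1 now (ws.getD k ""))) =
          (List.range ws.length).filter
            ((fun k => decide (v.getD (idx + k) true = false) &&
              decide (da1 now ((w :: ws).getD k ""))) ∘ Nat.succ) := by
        apply List.filter_congr
        intro k _
        simp only [Function.comp_apply]
        rw [getD_set_ne true true v idx (idx + 1 + k) (by omega)]
        have h3 : idx + 1 + k = idx + Nat.succ k := by omega
        rw [h3]
        rfl
      rw [hfc]
      exact List.map_congr_left (fun a _ => rfl)
    · rw [expand_cons_neg now w ws idx v hc]
      rw [if_neg (show ¬ ((decide (v.getD (idx + 0) true = false) &&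
            decide (da1 now ((w :: ws).getD 0 ""))) = true) by
          intro hcontra
          obtain ⟨ha, hb⟩ := (Bool.and_eq_true _ _).mp hcontra
          exact hc ⟨by simpa using ha, by simpa using hb⟩)]
      rw [List.map_map, ih (idx + 1) v]
      have hfc : (List.range ws.length).filter
            (fun k => decide (v.getD (idx + 1 + k) true = false) &&
              decide (da1 now (ws.getD k ""))) =
          (List.range ws.length).filter
            ((fun k => decide (v.getD (idx + k) true = false) &&
              decide (da1 now ((w :: ws).getD k ""))) ∘ Nat.succ) := by
        apply List.filter_congr
        intro k _
        simp only [Function.comp_apply]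
        have h3 : idx + 1 + k = idx + Nat.succ k := by omega
        rw [h3]
        rfl
      rw [hfc]
      exact List.map_congr_left (fun a _ => rfl)

theorem expand0_fst_getD (now : String) (W : List String) (v : List Bool) (j : Nat) :
    ((expand now W 0 v).1.getD j true = false) ↔
      (v.getD j true = false ∧ (j < W.length → ¬ da1 now (W.getD j ""))) := by
  rw [expand_fst_getD]
  constructor
  · rintro ⟨h1, h2⟩
    exact ⟨h1, fun hj => h2 j (by omega) hj⟩
  · rintro ⟨h1, h2⟩
    refine ⟨h1, ?_⟩
    intro k hk hlt
    have : k = j := by omega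
    subst this
    exact h2 hlt

-- one whole BFS level of A
def expandLevel (words : List String) : List String → List Bool → List Bool × List String
  | [], v => (v, [])
  | f :: F, v =>
    ((expandLevel words F (expand f words 0 v).1).1,
      (expand f words 0 v).2 ++ (expandLevel words F (expand f words 0 v).1).2)

theorem loopA_cons (target : String) (words : List String) (now : String) (cnt : Int)
    (rest : List (String × Int)) (ans : Int) (visited : List Bool) :
    loopA target words ((now, cnt) :: rest) ans visited =
      loopA target words (innerA target now cnt words 0 ans visited rest).2.2
        (innerA target now cnt words 0 ans visited rest).1
        (innerA target now cnt words 0 ans visited rest).2.1 := by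
  rw [loopA]

theorem loopA_nil (target : String) (words : List String) (ans : Int) (visited : List Bool) :
    loopA target words [] ans visited = ans := by
  rw [loopA]

theorem loopA_level (target : String) (words : List String) :
    ∀ (F : List String), (∀ f ∈ F, f ≠ target) →
      ∀ (G : List (String × Int)) (v : List Bool) (ans : Int) (k : Int),
        loopA target words (F.map (fun s => (s, k)) ++ G) ans v =
          loopA target words (G ++ (expandLevel words F v).2.map (fun s => (s, k + 1))) ans
            (expandLevel words F v).1 := by
  intro F
  induction F with
  | nil => intro _ G v ans k; simp [expandLevel]
  | cons f F ih =>
    intro hne G v ans k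
    have hf : ¬ f = target := hne f (by simp)
    rw [List.map_cons, List.cons_append, loopA_cons,
      innerA_eq_expand target f k hf words 0 ans v (F.map (fun s => (s, k)) ++ G)]
    dsimp only
    rw [List.append_assoc,
      ih (fun g hg => hne g (by simp [hg])) (G ++ (expand f words 0 v).2.map (fun s => (s, k + 1)))
        (expand f words 0 v).1 ans k]
    show _ = loopA target words (G ++ ((expandLevel words (f :: F) v).2.map (fun s => (s, k + 1)))) ans
      (expandLevel words (f :: F) v).1
    simp only [expandLevel, List.map_append, List.append_assoc]

theorem expandLevel_fst_getD (words : List String) :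
    ∀ (F : List String) (v : List Bool) (j : Nat),
      ((expandLevel words F v).1.getD j true = false) ↔
        (v.getD j true = false ∧ ∀ f ∈ F, j < words.length → ¬ da1 f (words.getD j "")) := by
  intro F
  induction F with
  | nil => intro v j; simp [expandLevel]
  | cons f F ih =>
    intro v j
    show ((expandLevel words F (expand f words 0 v).1).1.getD j true = false) ↔ _
    rw [ih, expand0_fst_getD, List.forall_mem_cons, and_assoc]

theorem filter_orsplit {α : Type} :
    ∀ (l : List α) (p q r : α → Bool), (∀ x ∈ l, r x = (p x || q x)) →
      (l.filter r).Perm (l.filter p ++ l.filter (fun x => !p x && q x)) := by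
  intro l
  induction l with
  | nil => intro p q r _; simp
  | cons x l ih =>
    intro p q r h
    have hx := h x (by simp)
    have ihl := ih p q r (fun y hy => h y (by simp [hy]))
    rw [List.filter_cons, List.filter_cons, List.filter_cons]
    by_cases hp : p x = true
    · have hr : r x = true := by rw [hx, hp, Bool.true_or]
      rw [if_pos hr, if_pos hp, if_neg (by simp [hp])]
      rw [List.cons_append]
      exact ihl.cons x
    · have hp' : p x = false := by revert hp; cases p x <;> simp
      by_cases hq : q x = true
      · have hr : r x = true := by rw [hx, hp', hq]; rfl
        rw [if_pos hr, if_neg hp, if_pos (by simp [hp', hq])]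
        exact (ihl.cons x).trans List.perm_middle.symm
      · have hq' : q x = false := by revert hq; cases q x <;> simp
        have hr : r x = false := by rw [hx, hp', hq']; rfl
        rw [if_neg (by simp [hr]), if_neg hp, if_neg (by simp [hq'])]
        exact ihl

theorem expandLevel_snd_perm (words : List String) :
    ∀ (F : List String) (v : List Bool),
      (expandLevel words F v).2.Perm
        (((List.range words.length).filter
            (fun i => decide (v.getD i true = false) &&
              F.any (fun f => decide (da1 f (words.getD i ""))))).map
          (fun i => words.getD i "")) := by
  intro F
  induction F with
  | nil =>
    intro v
    show List.Perm [] _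
    have h0 : (List.range words.length).filter
        (fun i => decide (v.getD i true = false) &&
          ([] : List String).any (fun f => decide (da1 f (words.getD i "")))) = [] := by
      apply List.filter_eq_nil_iff.mpr
      intro a _
      simp
    rw [h0]
    simp
  | cons f F ih =>
    intro v
    show ((expand f words 0 v).2 ++ (expandLevel words F (expand f words 0 v).1).2).Perm _
    have he2 : (expand f words 0 v).2 =
        ((List.range words.length).filter
          (fun k => decide (v.getD k true = false) && decide (da1 f (words.getD k "")))).map
          (fun k => words.getD k "") := by
      rw [expand_snd]
      congr 1
      apply List.filter_congr
      intro k _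
      simp
    have hrw : (List.range words.length).filter
          (fun i => decide ((expand f words 0 v).1.getD i true = false) &&
            F.any (fun g => decide (da1 g (words.getD i "")))) =
        (List.range words.length).filter
          (fun i => !(decide (v.getD i true = false) && decide (da1 f (words.getD i ""))) &&
            (decide (v.getD i true = false) && F.any (fun g => decide (da1 g (words.getD i ""))))) := by
      apply List.filter_congr
      intro i hi
      have hi' : i < words.length := List.mem_range.mp hi
      by_cases h1 : v.getD i true = false
      · by_cases h2 : da1 f (words.getD i "")
        · have he : ¬ ((expand f words 0 v).1.getD i true = false) := by
            rw [expand0_fst_getD]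
            rintro ⟨_, hno⟩
            exact hno hi' h2
          rw [(decide_eq_false he : decide ((expand f words 0 v).1.getD i true = false) = false),
            (decide_eq_true h1 : decide (v.getD i true = false) = true),
            (decide_eq_true h2 : decide (da1 f (words.getD i "")) = true)]
          simp
        · have he : (expand f words 0 v).1.getD i true = false := by
            rw [expand0_fst_getD]
            exact ⟨h1, fun _ => h2⟩
          rw [(decide_eq_true he : decide ((expand f words 0 v).1.getD i true = false) = true),
            (decide_eq_true h1 : decide (v.getD i true = false) = true),
            (decide_eq_false h2 : decide (da1 f (words.getD i "")) = false)]
          simp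
      · have he : ¬ ((expand f words 0 v).1.getD i true = false) := by
          rw [expand0_fst_getD]
          rintro ⟨hh, _⟩
          exact h1 hh
        rw [(decide_eq_false he : decide ((expand f words 0 v).1.getD i true = false) = false),
          (decide_eq_false h1 : decide (v.getD i true = false) = false)]
        simp
    have hsplit := filter_orsplit (List.range words.length)
      (fun i => decide (v.getD i true = false) && decide (da1 f (words.getD i "")))
      (fun i => decide (v.getD i true = false) && F.any (fun g => decide (da1 g (words.getD i ""))))
      (fun i => decide (v.getD i true = false) && (f :: F).any (fun g => decide (da1 g (words.getD i ""))))
      (by intro x _; simp [List.any_cons, Bool.and_or_distrib_left])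
    have hmid : ((expand f words 0 v).2 ++ (expandLevel words F (expand f words 0 v).1).2).Perm
        ((expand f words 0 v).2 ++ (((List.range words.length).filter
          (fun i => !(decide (v.getD i true = false) && decide (da1 f (words.getD i ""))) &&
            (decide (v.getD i true = false) && F.any (fun g => decide (da1 g (words.getD i "")))))).map
          (fun i => words.getD i ""))) := by
      apply List.Perm.append_left
      have hx := ih (expand f words 0 v).1
      rwa [hrw] at hx
    refine hmid.trans ?_
    rw [he2, ← List.map_append]
    exact (List.Perm.map (fun i => words.getD i "") hsplit).symm

theorem loopA_tail (target : String) (words : List String) (c0 : Int) :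
    ∀ (n : Nat) (q : List (String × Int)) (ans : Int) (v : List Bool),
      q.length + v.countP (fun b => !b) ≤ n →
      (∀ i, i < words.length → words.getD i "" = target → v.getD i true = true) →
      (∀ p ∈ q, p.1 = target → p.2 = c0) →
      (words = [] → q.all (fun p => decide (p.1 ≠ target)) = true) →
      loopA target words q ans v =
        if q.any (fun p => decide (p.1 = target)) = true then c0 else ans := by
  intro n
  induction n with
  | zero =>
    intro q ans v hle hvis hc0 hemp
    have hq : q = [] := by
      cases q with
      | nil => rfl
      | cons a t => simp [List.length_cons] at hle
    subst hq
    simp [loopA_nil]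
  | succ n ih =>
    intro q ans v hle hvis hc0 hemp
    cases q with
    | nil => simp [loopA_nil]
    | cons hd rest =>
      obtain ⟨now, cnt⟩ := hd
      rw [loopA_cons]
      by_cases ht : now = target
      · have hw : words ≠ [] := by
          intro hnil
          have := hemp hnil
          simp [ht] at this
        obtain ⟨w0, ws0, hW⟩ : ∃ w0 ws0, words = w0 :: ws0 := by
          cases words with
          | nil => exact absurd rfl hw
          | cons a t => exact ⟨a, t, rfl⟩
        rw [hW, innerA_eq_target target now cnt ht, ← hW]
        dsimp only
        have hcnt : cnt = c0 := hc0 (now, cnt) (by simp) ht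
        rw [ih rest cnt v (by simp only [List.length_cons] at hle; omega) hvis
          (fun p hp => hc0 p (by simp [hp]))
          (fun hnil => by
            have := hemp hnil
            simp only [List.all_cons, Bool.and_eq_true] at this
            exact this.2)]
        rw [hcnt, if_pos (show ((now, c0) :: rest).any (fun p => decide (p.1 = target)) = true
          by simp [ht])]
        by_cases hh : rest.any (fun p => decide (p.1 = target)) = true
        · rw [if_pos hh]
        · rw [if_neg hh]
      · rw [innerA_eq_expand target now cnt ht words 0 ans v rest]
        dsimp only
        have hsub : ∀ s ∈ (expand now words 0 v).2, ¬ s = target := by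
          intro s hs heq
          rw [expand_snd] at hs
          obtain ⟨k, hk, rfl⟩ := List.mem_map.mp hs
          obtain ⟨hkr, hkp⟩ := List.mem_filter.mp hk
          have hklt : k < words.length := List.mem_range.mp hkr
          have hvk : v.getD k true = false := by
            have := ((Bool.and_eq_true _ _).mp hkp).1
            simpa using this
          have := hvis k hklt heq
          rw [this] at hvk
          simp at hvk
        have hm := innerA_measure target now cnt words 0 ans v rest
        rw [innerA_eq_expand target now cnt ht words 0 ans v rest] at hm
        dsimp only at hm
        rw [ih (rest ++ (expand now words 0 v).2.map (fun s => (s, cnt + 1))) ans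
          (expand now words 0 v).1
          (by simp only [List.length_cons] at hle; omega)
          (by
            intro i hi hit
            cases hE : (expand now words 0 v).1.getD i true with
            | true => rfl
            | false =>
              exfalso
              have h1 := ((expand0_fst_getD now words v i).mp hE).1
              have h2 := hvis i hi hit
              rw [h2] at h1
              simp at h1)
          (by
            intro p hp hpt
            rcases List.mem_append.mp hp with hmem | hmem
            · exact hc0 p (by simp [hmem]) hpt
            · obtain ⟨s, hs, rfl⟩ := List.mem_map.mp hmem
              exact absurd hpt (hsub s hs))
          (by
            intro hnil
            have h2 := hemp hnil
            simp only [List.all_cons, Bool.and_eq_true] at h2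
            rw [hnil, expand_nil]
            simp only [List.map_nil, List.append_nil]
            exact h2.2)]
        have hany : (rest ++ (expand now words 0 v).2.map (fun s => (s, cnt + 1))).any
            (fun p => decide (p.1 = target)) = rest.any (fun p => decide (p.1 = target)) := by
          rw [List.any_append]
          have hfa : ((expand now words 0 v).2.map (fun s => (s, cnt + 1))).any
              (fun p => decide (p.1 = target)) = false := by
            apply List.any_eq_false.mpr
            intro p hp
            obtain ⟨s, hs, rfl⟩ := List.mem_map.mp hp
            simpa using hsub s hs
          rw [hfa, Bool.or_false]
        rw [hany]
        have hhd : ((now, cnt) :: rest).any (fun p => decide (p.1 = target)) =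
            rest.any (fun p => decide (p.1 = target)) := by simp [ht]
        rw [hhd]

theorem loopA_all_visited (target : String) (words FA : List String) (v : List Bool) (dist : Int)
    (hvis : ∀ i, i < words.length → v.getD i true = true)
    (hne : ∀ f ∈ FA, f ≠ target) :
    loopA target words (FA.map (fun s => (s, dist))) 0 v = 0 := by
  rw [loopA_tail target words 0 ((FA.map (fun s => (s, dist))).length + v.countP (fun b => !b))
    (FA.map (fun s => (s, dist))) 0 v (le_refl _)
    (fun i hi _ => hvis i hi)
    (by
      intro p hp hpt
      obtain ⟨s, hs, rfl⟩ := List.mem_map.mp hp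
      exact absurd hpt (hne s hs))
    (by
      intro _
      apply List.all_eq_true.mpr
      intro p hp
      obtain ⟨s, hs, rfl⟩ := List.mem_map.mp hp
      simpa using hne s hs)]
  split <;> rfl

theorem loopB_eq (target : String) (words : List String) (remaining : List Nat)
    (frontier : List String) (dist : Int) :
    loopB target words remaining frontier dist =
      if frontier.isEmpty || remaining.isEmpty then 0
      else
        if (nxtOf words remaining frontier).any (fun i => words.getD i "" == target) then dist + 1
        else loopB target words
          (remaining.filter (fun i => !((nxtOf words remaining frontier).contains i)))
          ((nxtOf words remaining frontier).map (fun i => words.getD i "")) (dist + 1) := by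
  rw [loopB.eq_def]

theorem main_level (target : String) (words : List String) :
    ∀ (n : Nat) (v : List Bool) (FA FB : List String) (dist : Int),
      ((List.range words.length).filter (fun i => decide (v.getD i true = false))).length ≤ n →
      FA.Perm FB →
      (∀ f ∈ FA, f ≠ target) →
      loopA target words (FA.map (fun s => (s, dist))) 0 v =
        loopB target words
          ((List.range words.length).filter (fun i => decide (v.getD i true = false))) FB dist := by
  intro n
  induction n with
  | zero =>
    intro v FA FB dist hle hperm hne
    have hrem : (List.range words.length).filter (fun i => decide (v.getD i true = false)) = [] :=
      List.length_eq_zero_iff.mp (Nat.le_zero.mp hle)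
    rw [hrem, loopB_eq, if_pos (by simp)]
    apply loopA_all_visited target words FA v dist ?_ hne
    intro i hi
    have := List.filter_eq_nil_iff.mp hrem i (List.mem_range.mpr hi)
    cases h : v.getD i true with
    | true => rfl
    | false => exact absurd (decide_eq_true h) this
  | succ n ih =>
    intro v FA FB dist hle hperm hne
    by_cases hFB : FB = []
    · subst hFB
      have hFA : FA = [] := List.Perm.eq_nil hperm
      subst hFA
      rw [loopB_eq, if_pos (by simp)]
      simpa using loopA_nil target words 0 v
    by_cases hrem : (List.range words.length).filter (fun i => decide (v.getD i true = false)) = []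
    · rw [hrem, loopB_eq, if_pos (by simp)]
      apply loopA_all_visited target words FA v dist ?_ hne
      intro i hi
      have := List.filter_eq_nil_iff.mp hrem i (List.mem_range.mpr hi)
      cases h : v.getD i true with
      | true => rfl
      | false => exact absurd (decide_eq_true h) this
    -- both frontier and remaining nonempty
    have hanyFB : ∀ i : Nat, FB.any (fun f => diffOne f (words.getD i "")) =
        FA.any (fun f => decide (da1 f (words.getD i ""))) := by
      intro i
      rw [show (fun f => diffOne f (words.getD i "")) = (fun f => decide (da1 f (words.getD i "")))
        from funext (fun f => diffOne_eq_decide f _)]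
      exact hperm.any_eq.symm
    have hnxteq : (((List.range words.length).filter (fun i => decide (v.getD i true = false))).filter
          (fun i => FB.any (fun f => diffOne f (words.getD i "")))) =
        (List.range words.length).filter
          (fun i => decide (v.getD i true = false) &&
            FA.any (fun f => decide (da1 f (words.getD i "")))) := by
      rw [List.filter_filter]
      apply List.filter_congr
      intro i _
      rw [hanyFB i, Bool.and_comm]
    have hA := loopA_level target words FA hne [] v 0 dist
    simp only [List.append_nil, List.nil_append] at hA
    rw [hA, loopB_eq, nxtOf_eq, if_neg (show ¬ ((FB.isEmpty ||
      ((List.range words.length).filter (fun i => decide (v.getD i true = false))).isEmpty) = true) by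
        intro hcontra
        rcases Bool.or_eq_true_iff.mp hcontra with hx | hx
        · exact hFB (List.isEmpty_iff.mp hx)
        · exact hrem (List.isEmpty_iff.mp hx))]
    have hperm' : (expandLevel words FA v).2.Perm
        ((((List.range words.length).filter (fun i => decide (v.getD i true = false))).filter
          (fun i => FB.any (fun f => diffOne f (words.getD i "")))).map (fun i => words.getD i "")) := by
      rw [hnxteq]
      exact expandLevel_snd_perm words FA v
    by_cases hfound : (((List.range words.length).filter (fun i => decide (v.getD i true = false))).filter
        (fun i => FB.any (fun f => diffOne f (words.getD i "")))).any
        (fun i => words.getD i "" == target) = true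
    · rw [if_pos hfound]
      obtain ⟨j, hjmem, hjbeq⟩ := List.any_eq_true.mp hfound
      have hjt : words.getD j "" = target := by simpa using hjbeq
      have hjlt : j < words.length :=
        List.mem_range.mp (List.mem_filter.mp (List.mem_filter.mp hjmem).1).1
      have hadjT : FA.any (fun f => decide (da1 f target)) = true := by
        have hx := (List.mem_filter.mp hjmem).2
        rw [hanyFB j, hjt] at hx
        exact hx
      have hTin : target ∈ (expandLevel words FA v).2 := by
        rw [hperm'.mem_iff]
        exact List.mem_map.mpr ⟨j, hjmem, hjt⟩
      rw [loopA_tail target words (dist + 1)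
        (((expandLevel words FA v).2.map (fun s => (s, dist + 1))).length +
          (expandLevel words FA v).1.countP (fun b => !b))
        ((expandLevel words FA v).2.map (fun s => (s, dist + 1))) 0 (expandLevel words FA v).1
        (le_refl _)
        (by
          intro i hi hit
          cases hE : (expandLevel words FA v).1.getD i true with
          | true => rfl
          | false =>
            exfalso
            obtain ⟨_, hall⟩ := (expandLevel_fst_getD words FA v i).mp hE
            obtain ⟨f, hf, hdf⟩ := List.any_eq_true.mp hadjT
            exact hall f hf hi (by rw [hit]; simpa using hdf))
        (by
          intro p hp _
          obtain ⟨s, _, rfl⟩ := List.mem_map.mp hp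
          rfl)
        (fun hnil => absurd hnil (by intro hx; rw [hx] at hjlt; simp at hjlt))]
      rw [if_pos (List.any_eq_true.mpr
        ⟨(target, dist + 1), List.mem_map.mpr ⟨target, hTin, rfl⟩, by simp⟩)]
    · rw [if_neg hfound]
      by_cases hn : (((List.range words.length).filter (fun i => decide (v.getD i true = false))).filter
          (fun i => FB.any (fun f => diffOne f (words.getD i "")))) = []
      · rw [hn]
        have hL : (expandLevel words FA v).2 = [] := by
          have hx := hperm'
          rw [hn] at hx
          simpa using List.Perm.eq_nil (by simpa using hx)
        rw [hL]
        rw [loopB_eq, if_pos (by simp)]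
        simpa using loopA_nil target words 0 (expandLevel words FA v).1
      · have hR' : (((List.range words.length).filter (fun i => decide (v.getD i true = false))).filter
            (fun i => !((((List.range words.length).filter (fun i => decide (v.getD i true = false))).filter
              (fun i => FB.any (fun f => diffOne f (words.getD i "")))).contains i))) =
            (List.range words.length).filter
              (fun i => decide ((expandLevel words FA v).1.getD i true = false)) := by
          rw [List.filter_filter]
          apply List.filter_congr
          intro i hi
          have hilt : i < words.length := List.mem_range.mp hi
          by_cases h1 : v.getD i true = false
          · by_cases h2 : FA.any (fun f => decide (da1 f (words.getD i ""))) = true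
            · have hmem : i ∈ ((List.range words.length).filter (fun i => decide (v.getD i true = false))).filter
                  (fun i => FB.any (fun f => diffOne f (words.getD i ""))) := by
                apply List.mem_filter.mpr
                refine ⟨List.mem_filter.mpr ⟨hi, by simpa using h1⟩, ?_⟩
                rw [hanyFB i]
                exact h2
              have hv' : ¬ ((expandLevel words FA v).1.getD i true = false) := by
                rw [expandLevel_fst_getD]
                rintro ⟨_, hall⟩
                obtain ⟨f, hf, hdf⟩ := List.any_eq_true.mp h2
                exact hall f hf hilt (by simpa using hdf)
              have hcont : (((List.range words.length).filter (fun i => decide (v.getD i true = false))).filter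
                  (fun i => FB.any (fun f => diffOne f (words.getD i "")))).contains i = true := by
                rw [List.contains_iff_mem]; exact hmem
              rw [hcont,
                (decide_eq_true h1 : decide (v.getD i true = false) = true),
                (decide_eq_false hv' : decide ((expandLevel words FA v).1.getD i true = false) = false)]
              rfl
            · have hnmem : i ∉ ((List.range words.length).filter (fun i => decide (v.getD i true = false))).filter
                  (fun i => FB.any (fun f => diffOne f (words.getD i ""))) := by
                intro hmem
                have hx := (List.mem_filter.mp hmem).2
                rw [hanyFB i] at hx
                exact h2 hx
              have hv' : (expandLevel words FA v).1.getD i true = false := by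
                rw [expandLevel_fst_getD]
                refine ⟨h1, ?_⟩
                intro f hf _ hda
                exact h2 (List.any_eq_true.mpr ⟨f, hf, by simpa using hda⟩)
              have hcont : (((List.range words.length).filter (fun i => decide (v.getD i true = false))).filter
                  (fun i => FB.any (fun f => diffOne f (words.getD i "")))).contains i = false := by
                cases hcc : (((List.range words.length).filter (fun i => decide (v.getD i true = false))).filter
                    (fun i => FB.any (fun f => diffOne f (words.getD i "")))).contains i with
                | false => rfl
                | true => exact absurd (List.contains_iff_mem.mp hcc) hnmem
              rw [hcont,
                (decide_eq_true h1 : decide (v.getD i true = false) = true),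
                (decide_eq_true hv' : decide ((expandLevel words FA v).1.getD i true = false) = true)]
              rfl
          · have hv' : ¬ ((expandLevel words FA v).1.getD i true = false) := by
              rw [expandLevel_fst_getD]
              rintro ⟨hh, _⟩
              exact h1 hh
            rw [(decide_eq_false h1 : decide (v.getD i true = false) = false),
              (decide_eq_false hv' : decide ((expandLevel words FA v).1.getD i true = false) = false)]
            simp
        rw [hR']
        have hlt : ((List.range words.length).filter
            (fun i => decide ((expandLevel words FA v).1.getD i true = false))).length ≤ n := by
          rw [← hR']
          have hstrict : ((((List.range words.length).filter (fun i => decide (v.getD i true = false))).filter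
              (fun i => !((((List.range words.length).filter (fun i => decide (v.getD i true = false))).filter
                (fun i => FB.any (fun f => diffOne f (words.getD i "")))).contains i)))).length <
              (((List.range words.length).filter (fun i => decide (v.getD i true = false)))).length := by
            apply List.length_filter_lt_length_iff_exists.mpr
            obtain ⟨j, hj⟩ : ∃ j, j ∈ ((List.range words.length).filter
                (fun i => decide (v.getD i true = false))).filter
                (fun i => FB.any (fun f => diffOne f (words.getD i ""))) := by
              cases h : ((List.range words.length).filter
                  (fun i => decide (v.getD i true = false))).filter
                  (fun i => FB.any (fun f => diffOne f (words.getD i ""))) with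
              | nil => exact absurd h hn
              | cons a t => exact ⟨a, by simp⟩
            refine ⟨j, (List.mem_filter.mp hj).1, ?_⟩
            have hcont : (((List.range words.length).filter (fun i => decide (v.getD i true = false))).filter
                (fun i => FB.any (fun f => diffOne f (words.getD i "")))).contains j = true := by
              rw [List.contains_iff_mem]; exact hj
            rw [hcont]
            simp
          omega
        apply ih (expandLevel words FA v).1 (expandLevel words FA v).2
          ((((List.range words.length).filter (fun i => decide (v.getD i true = false))).filter
            (fun i => FB.any (fun f => diffOne f (words.getD i "")))).map (fun i => words.getD i ""))
          (dist + 1) hlt hperm'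
        intro s hs
        rw [hperm'.mem_iff] at hs
        obtain ⟨j, hjmem, rfl⟩ := List.mem_map.mp hs
        have hx := List.any_eq_false.mp (by
          cases h : (((List.range words.length).filter (fun i => decide (v.getD i true = false))).filter
              (fun i => FB.any (fun f => diffOne f (words.getD i "")))).any
              (fun i => words.getD i "" == target)
          · rfl
          · exact absurd h hfound) j hjmem
        simpa using hx

theorem getD_replicate_false (n i : Nat) (h : i < n) :
    (List.replicate n false).getD i true = false := by
  rw [List.getD_eq_getElem?_getD]
  simp [h]

theorem solution_eq_alt (begin target : String) (words : List String) :
    solution begin target words = solution_alt begin target words := by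
  by_cases hbt : begin = target
  · show loopA target words [(begin, 0)] 0 (List.replicate words.length false) = _
    unfold solution_alt
    rw [if_pos hbt]
    cases words with
    | nil =>
      rw [loopA_cons, innerA]
      dsimp only
      exact loopA_nil target [] 0 (List.replicate ([] : List String).length false)
    | cons w ws =>
      rw [loopA_cons, innerA_eq_target target begin 0 hbt]
      dsimp only
      exact loopA_nil target (w :: ws) 0 (List.replicate (w :: ws).length false)
  · show loopA target words [(begin, 0)] 0 (List.replicate words.length false) = _
    unfold solution_alt
    rw [if_neg hbt]
    have h0 : (List.range words.length).filter
        (fun i => decide ((List.replicate words.length false).getD i true = false)) =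
        List.range words.length := by
      apply List.filter_eq_self.mpr
      intro i hi
      exact decide_eq_true (getD_replicate_false words.length i (List.mem_range.mp hi))
    have hmain := main_level target words words.length (List.replicate words.length false)
      [begin] [begin] 0 (by rw [h0]; simp) (List.Perm.refl _)
      (by intro f hf; simp at hf; subst hf; exact hbt)
    rw [h0] at hmain
    simpa using hmain

-- ===== VERDICT (by name: the statement is the Claim_ definition above) =====
theorem solution_spec : Claim_equal_solution := by
  intro b t w _
  unfold Spec_solution
  exact solution_eq_alt b t w
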